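-- pv_equiv track=rewrite | github.com/BatuhanUtebay/DVEngine | dvge/ai/enhanced_generators.py | _parse_plot_holes
-- ===== SOURCE A (Python) =====
-- from typing import Dict, Any, List, Optional, Tuple, Set
--
-- def _parse_plot_holes(content: str) -> List[Dict[str, Any]]:
--     """Parse plot hole detection response."""
--     plot_holes = []
--
--     # Simple parsing - look for structured issues
--     lines = content.split('\n')
--     current_hole = {}
--
--     for line in lines:
--         line = line.strip()
--         if not line:
--             if current_hole:
--                 plot_holes.append(current_hole)
--                 current_hole = {}
--             continue
--
--         # Look for issue indicators
--         if any(indicator in line.lower() for indicator in ['issue:', 'problem:', 'inconsistency:', 'error:']):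
--             current_hole['description'] = line
--             current_hole['severity'] = 'moderate'  # default
--             current_hole['category'] = 'plot'
--         elif 'severity' in line.lower():
--             if 'major' in line.lower():
--                 current_hole['severity'] = 'major'
--             elif 'minor' in line.lower():
--                 current_hole['severity'] = 'minor'
--         elif 'fix' in line.lower() or 'suggest' in line.lower():
--             current_hole['suggested_fix'] = line
--
--     if current_hole:
--         plot_holes.append(current_hole)
--
--     # If no structured parsing worked, create generic entry
--     if not plot_holes and content:
--         plot_holes.append({
--             "description": "Analysis completed - see full content for details",
--             "severity": "unknown",
--             "category": "general",
--             "full_analysis": content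
--         })
--
--     return plot_holes
-- ===== SOURCE B (Python) =====
-- from typing import Dict, Any, List, Optional, Tuple, Set
--
--
-- def _classify_line(hole: Dict[str, Any], line: str) -> None:
--     """Apply the per-line classification to a (stripped, non-empty) line."""
--     low = line.lower()
--     if any(indicator in low for indicator in ['issue:', 'problem:', 'inconsistency:', 'error:']):
--         hole['description'] = line
--         hole['severity'] = 'moderate'
--         hole['category'] = 'plot'
--     elif 'severity' in low:
--         if 'major' in low:
--             hole['severity'] = 'major'
--         elif 'minor' in low:
--             hole['severity'] = 'minor'
--     elif 'fix' in low or 'suggest' in low: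
--         hole['suggested_fix'] = line
--
--
-- def _blocks(lines: List[str]) -> List[List[str]]:
--     """Group consecutive non-blank stripped lines into blocks."""
--     groups: List[List[str]] = []
--     cur: List[str] = []
--     for raw in lines:
--         line = raw.strip()
--         if line:
--             cur.append(line)
--         elif cur:
--             groups.append(cur)
--             cur = []
--     if cur:
--         groups.append(cur)
--     return groups
--
--
-- def _parse_plot_holes(content: str) -> List[Dict[str, Any]]:
--     """Parse plot hole detection response (group lines into blocks, then map each block)."""
--     plot_holes = []
--     for group in _blocks(content.split('\n')):
--         hole: Dict[str, Any] = {}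
--         for line in group:
--             _classify_line(hole, line)
--         if hole:
--             plot_holes.append(hole)
--
--     if not plot_holes and content:
--         plot_holes.append({
--             "description": "Analysis completed - see full content for details",
--             "severity": "unknown",
--             "category": "general",
--             "full_analysis": content,
--         })
--
--     return plot_holes
-- ===== Notes on version B (the rewrite author's own statement) =====
-- stated objective: alternative
-- what changed: B replaces A's inline accumulate-and-flush state machine with an explicit two-phase pass: first group consecutive non-blank stripped lines into blocks, then map each block to a hole dict (kept if non-empty), with the same generic-entry fallback.
import Mathlib
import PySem

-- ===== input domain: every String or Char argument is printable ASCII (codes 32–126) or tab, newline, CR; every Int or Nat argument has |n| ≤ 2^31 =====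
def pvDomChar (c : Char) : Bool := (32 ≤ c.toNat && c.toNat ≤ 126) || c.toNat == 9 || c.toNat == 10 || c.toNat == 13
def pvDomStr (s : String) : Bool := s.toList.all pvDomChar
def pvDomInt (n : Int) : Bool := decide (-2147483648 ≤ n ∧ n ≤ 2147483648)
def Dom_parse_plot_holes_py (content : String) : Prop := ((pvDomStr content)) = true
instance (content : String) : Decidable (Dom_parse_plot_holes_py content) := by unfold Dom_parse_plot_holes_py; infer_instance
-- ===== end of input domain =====

-- B replaces A's inline accumulate-and-flush state machine by an explicit group-blank-separated-
-- lines pass followed by mapping each block to a hole dict (objective: alternative decomposition).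


-- ===== PORT A =====
-- per-line classification (this code is textually identical in A and in Source B, so it is one shared
-- helper; `line` is already stripped and non-empty)
def pvClassifyLine (d : PySem.Dict String String) (line : String) : PySem.Dict String String :=
  let low := PySem.Str.lower line
  if PySem.Str.isIn "issue:" low || PySem.Str.isIn "problem:" low ||
     PySem.Str.isIn "inconsistency:" low || PySem.Str.isIn "error:" low then
    ((d.insert "description" line).insert "severity" "moderate").insert "category" "plot"
  else if PySem.Str.isIn "severity" low then
    (if PySem.Str.isIn "major" low then d.insert "severity" "major"
     else if PySem.Str.isIn "minor" low then d.insert "severity" "minor"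
     else d)
  else if PySem.Str.isIn "fix" low || PySem.Str.isIn "suggest" low then
    d.insert "suggested_fix" line
  else d

-- the generic fallback entry, common literal text of both Pythons
def pvGenericHole (content : String) : PySem.Dict String String :=
  ((((PySem.Dict.empty.insert "description" "Analysis completed - see full content for details").insert
      "severity" "unknown").insert "category" "general").insert "full_analysis" content)

def parse_plot_holes_py (content : String) : List (List (String × String)) :=
  let lines := (PySem.Str.split? content "\n").getD []
  -- state = (plot_holes, current_hole)
  let st := lines.foldl
    (fun (st : List (PySem.Dict String String) × PySem.Dict String String) rawline =>
      let line := PySem.Str.strip rawline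
      if line = "" then
        (if st.2.items.isEmpty then st else (st.1 ++ [st.2], PySem.Dict.empty))
      else (st.1, pvClassifyLine st.2 line))
    ([], PySem.Dict.empty)
  let plot_holes := if st.2.items.isEmpty then st.1 else st.1 ++ [st.2]
  let plot_holes :=
    if plot_holes.isEmpty && !(content = "") then [pvGenericHole content] else plot_holes
  plot_holes.map (·.items)

-- ===== PORT B =====
-- _blocks: group consecutive non-blank stripped lines (loop with `cur` accumulator + final flush)
def pvBlocks (cur : List String) : List String → List (List String)
  | [] => if cur.isEmpty then [] else [cur]
  | raw :: rest =>
    let line := PySem.Str.strip raw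
    if line ≠ "" then pvBlocks (cur ++ [line]) rest
    else if cur.isEmpty then pvBlocks [] rest
    else cur :: pvBlocks [] rest

-- one block → its hole dict, kept only if non-empty
def pvHoleOf (group : List String) : Option (PySem.Dict String String) :=
  let hole := group.foldl pvClassifyLine PySem.Dict.empty
  if hole.items.isEmpty then none else some hole

def parse_plot_holes_py_alt (content : String) : List (List (String × String)) :=
  let plot_holes := (pvBlocks [] ((PySem.Str.split? content "\n").getD [])).filterMap pvHoleOf
  let plot_holes :=
    if plot_holes.isEmpty && !(content = "") then [pvGenericHole content] else plot_holes
  plot_holes.map (·.items)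

-- ===== PRECONDITION & SPEC =====
def Spec_parse_plot_holes_py (content : String) (out : List (List (String × String))) : Prop := out = parse_plot_holes_py_alt content
instance (content : String) (out : List (List (String × String))) : Decidable (Spec_parse_plot_holes_py content out) := by unfold Spec_parse_plot_holes_py; infer_instance

-- ===== CLAIM (what is proved, stated in full; the proofs are below) =====
def Claim_equal_parse_plot_holes_py : Prop := ∀ (content : String), Dom_parse_plot_holes_py content → Spec_parse_plot_holes_py content (parse_plot_holes_py content)

-- ===== LEMMAS AND PROOFS =====

-- A's loop step and final flush, named for the proof
def pvStepA (st : List (PySem.Dict String String) × PySem.Dict String String) (rawline : String) :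
    List (PySem.Dict String String) × PySem.Dict String String :=
  let line := PySem.Str.strip rawline
  if line = "" then
    (if st.2.items.isEmpty then st else (st.1 ++ [st.2], PySem.Dict.empty))
  else (st.1, pvClassifyLine st.2 line)

def pvFinA (st : List (PySem.Dict String String) × PySem.Dict String String) :
    List (PySem.Dict String String) :=
  if st.2.items.isEmpty then st.1 else st.1 ++ [st.2]

lemma pvDict_empty_of_items_isEmpty {d : PySem.Dict String String}
    (h : d.items.isEmpty = true) : d = PySem.Dict.empty := by
  apply PySem.Dict.ext
  simpa [List.isEmpty_iff] using h

-- the central invariant: A's state machine started with the dict accumulated from `cur`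
-- equals `ph` plus B's group-then-map pass on the remaining lines
lemma pvMain (lines : List String) : ∀ (cur : List String) (ph : List (PySem.Dict String String)),
    pvFinA (lines.foldl pvStepA (ph, cur.foldl pvClassifyLine PySem.Dict.empty))
      = ph ++ (pvBlocks cur lines).filterMap pvHoleOf := by
  induction lines with
  | nil =>
    intro cur ph
    by_cases hc : cur.isEmpty
    · have : cur = [] := List.isEmpty_iff.mp hc
      subst this
      simp [pvFinA, pvBlocks, PySem.Dict.empty]
    · by_cases hd : (cur.foldl pvClassifyLine PySem.Dict.empty).items.isEmpty
      · simp [pvFinA, pvBlocks, hc, pvHoleOf, List.isEmpty_iff.mp hd]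
      · have hne : (cur.foldl pvClassifyLine PySem.Dict.empty).items ≠ [] := by
          simpa [List.isEmpty_iff] using hd
        simp [pvFinA, pvBlocks, hc, pvHoleOf, hd, hne]
  | cons raw rest ih =>
    intro cur ph
    simp only [List.foldl_cons]
    by_cases hs : PySem.Str.strip raw = ""
    · by_cases hd : (cur.foldl pvClassifyLine PySem.Dict.empty).items.isEmpty
      · -- current dict empty: nothing flushed; both sides restart with an empty accumulator
        have hst : pvStepA (ph, cur.foldl pvClassifyLine PySem.Dict.empty) raw
            = (ph, ([] : List String).foldl pvClassifyLine PySem.Dict.empty) := by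
          rw [pvDict_empty_of_items_isEmpty hd]
          simp [pvStepA, hs, show (PySem.Dict.empty : PySem.Dict String String).items = [] from rfl]
        rw [hst, ih [] ph]
        by_cases hc : cur.isEmpty
        · simp [pvBlocks, hs, hc]
        · -- cur non-empty but its dict is empty: B drops the block via pvHoleOf
          simp [pvBlocks, hs, hc, pvHoleOf, List.isEmpty_iff.mp hd]
      · -- current dict non-empty: A flushes it, B emits the block `cur`
        have hne : (cur.foldl pvClassifyLine PySem.Dict.empty).items ≠ [] := by
          simpa [List.isEmpty_iff] using hd
        have hcne : cur ≠ [] := by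
          intro hnil; rw [hnil] at hne; exact hne rfl
        have hc : cur.isEmpty = false := List.isEmpty_eq_false_iff.mpr hcne
        have hst : pvStepA (ph, cur.foldl pvClassifyLine PySem.Dict.empty) raw
            = (ph ++ [cur.foldl pvClassifyLine PySem.Dict.empty],
               ([] : List String).foldl pvClassifyLine PySem.Dict.empty) := by
          simp [pvStepA, hs, hd]
        rw [hst, ih [] (ph ++ [cur.foldl pvClassifyLine PySem.Dict.empty])]
        simp [pvBlocks, hs, hc, pvHoleOf, hne]
    · -- non-blank line: both sides extend the current block
      have hst : pvStepA (ph, cur.foldl pvClassifyLine PySem.Dict.empty) raw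
          = (ph, (cur ++ [PySem.Str.strip raw]).foldl pvClassifyLine PySem.Dict.empty) := by
        simp [pvStepA, hs]
      rw [hst, ih (cur ++ [PySem.Str.strip raw]) ph]
      simp [pvBlocks, hs]

-- ===== VERDICT (by name: the statement is the Claim_ definition above) =====
theorem parse_plot_holes_py_spec : Claim_equal_parse_plot_holes_py := by
  intro content _
  unfold Spec_parse_plot_holes_py parse_plot_holes_py parse_plot_holes_py_alt
  have h := pvMain ((PySem.Str.split? content "\n").getD []) [] []
  simp only [List.foldl_nil, List.nil_append] at h
  simp only [← h]
  rfl
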